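-- pv_equiv track=rewrite | github.com/MagerlinC/AgileSurveyScorer | main.py | get_company_scores
-- ===== SOURCE A (Python) =====
-- being_question_indexes = [9, 10, 12, 13, 14, 16, 17, 18, 19, 21, 22, 24, 25, 27, 28, 29, 30, 31, 32, 33, 34, 35, 36, 37]
--
-- doing_question_indexes = [11, 15, 20, 23, 26]
--
-- inverted_question_indexes = [14, 25, 28, 34, 37]
--
-- def get_company_scores(iterable, has_headers = True):
--     company_doing = 0
--     company_being = 0
--     doing_answers = []
--     being_answers = []
--     num_answers = 0
--     for (index, row) in enumerate(iterable):
--         num_answers += 1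
--         if(not has_headers or index > 0): # first row is headers
--             doing_score, being_score = get_answer_score(row)
--             company_doing += doing_score
--             company_being += being_score
--             doing_answers.append(doing_score)
--             being_answers.append(being_score)
--     #max_doing = num_answers * SINGLE_ANSWER_MAX_DOING
--     #max_being = num_answers * SINGLE_ANSWER_MAX_BEING
--     return (company_being, company_doing, being_answers, doing_answers)
--
-- def get_answer_score(answer_data):
--     doing_score = 0
--     being_score = 0
--     for(index, answer) in enumerate(answer_data):
--         if(index in doing_question_indexes):
--             doing_score += 1 if "yes" in answer.lower() else 0
--             doing_score += 1 if "every" in answer.lower() else 0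
--         elif(index in being_question_indexes):
--             being_score += (-1 * likert_to_int(answer)) if index in inverted_question_indexes else likert_to_int(answer)
--     return (doing_score, being_score)
--
-- def likert_to_int(likert_val):
--     if(likert_val):
--         conversion_dict = {
--             "strongly agree": 2,
--             "agree": 1,
--             "neutral": 0,
--             "disagree": -1,
--             "strongly disagree": -2
--         }
--         return conversion_dict[likert_val.lower()]
--     else:
--         return 0
-- ===== SOURCE B (Python) =====
-- being_question_indexes = [9, 10, 12, 13, 14, 16, 17, 18, 19, 21, 22, 24, 25, 27, 28, 29, 30, 31, 32, 33, 34, 35, 36, 37]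
-- doing_question_indexes = [11, 15, 20, 23, 26]
-- inverted_question_indexes = frozenset([14, 25, 28, 34, 37])
--
-- _LIKERT = {"strongly agree": 2, "agree": 1, "neutral": 0, "disagree": -1, "strongly disagree": -2}
--
-- def _likert(val):
--     return _LIKERT.get(val.lower(), 0) if val else 0
--
-- def _score_row(row):
--     n = len(row)
--     doing = 0
--     for idx in doing_question_indexes:
--         if idx < n:
--             a = row[idx].lower()
--             doing += ("yes" in a) + ("every" in a)
--     being = 0
--     for idx in being_question_indexes:
--         if idx < n:
--             v = _likert(row[idx])
--             being += -v if idx in inverted_question_indexes else v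
--     return (doing, being)
--
-- def get_company_scores(iterable, has_headers = True):
--     rows = list(iterable)
--     if has_headers:
--         rows = rows[1:]
--     scores = [_score_row(row) for row in rows]
--     doing_answers = [d for d, _ in scores]
--     being_answers = [b for _, b in scores]
--     return (sum(being_answers), sum(doing_answers), being_answers, doing_answers)
-- ===== Notes on version B (the rewrite author's own statement) =====
-- stated objective: alternative
-- what changed: Per row, B iterates only over the fixed doing/being index lists with a length guard and direct indexing instead of scanning every column and testing list membership, and rebuilds the company totals as sums of the per-row answer lists.
import Mathlib
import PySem

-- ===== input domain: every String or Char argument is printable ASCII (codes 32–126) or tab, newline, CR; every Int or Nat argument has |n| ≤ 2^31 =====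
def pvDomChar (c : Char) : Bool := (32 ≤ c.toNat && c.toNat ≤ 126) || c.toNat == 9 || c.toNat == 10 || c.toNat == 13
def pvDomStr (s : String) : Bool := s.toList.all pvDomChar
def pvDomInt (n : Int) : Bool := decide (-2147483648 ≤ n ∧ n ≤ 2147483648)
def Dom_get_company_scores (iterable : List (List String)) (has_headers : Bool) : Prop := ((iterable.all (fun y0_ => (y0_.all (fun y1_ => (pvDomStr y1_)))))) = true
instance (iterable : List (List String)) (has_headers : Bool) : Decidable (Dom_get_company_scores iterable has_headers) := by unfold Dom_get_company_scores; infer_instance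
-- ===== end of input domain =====

-- B iterates over the known question-index lists (with a length guard) instead of scanning every
-- column and testing membership, and rebuilds the totals as sums of the per-row answer lists.

-- module-level constants shared by both versions
def being_question_indexes : List Int := [9, 10, 12, 13, 14, 16, 17, 18, 19, 21, 22, 24, 25, 27, 28, 29, 30, 31, 32, 33, 34, 35, 36, 37]
def doing_question_indexes : List Int := [11, 15, 20, 23, 26]
def inverted_question_indexes : List Int := [14, 25, 28, 34, 37]

-- ===== PORT A =====
def conversion_dict : PySem.Dict String Int :=
  PySem.Dict.ofList [("strongly agree", 2), ("agree", 1), ("neutral", 0), ("disagree", -1), ("strongly disagree", -2)]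

-- Python raises KeyError on an unknown nonempty value; getD's default is unreachable under Pre_.
def likert_to_int (likert_val : String) : Int :=
  if likert_val ≠ "" then conversion_dict.getD (PySem.Str.lower likert_val) 0 else 0

def ansStep (st : Int × Int) (p : Int × String) : Int × Int :=
  if p.1 ∈ doing_question_indexes then
    (st.1 + (if PySem.Str.isIn "yes" (PySem.Str.lower p.2) then 1 else 0)
          + (if PySem.Str.isIn "every" (PySem.Str.lower p.2) then 1 else 0), st.2)
  else if p.1 ∈ being_question_indexes then
    (st.1, st.2 + (if p.1 ∈ inverted_question_indexes then (-1) * likert_to_int p.2 else likert_to_int p.2))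
  else st

def get_answer_score (answer_data : List String) : Int × Int :=
  (PySem.List.enumerate answer_data 0).foldl ansStep (0, 0)

def outerStep (has_headers : Bool) (st : Int × Int × List Int × List Int × Int) (p : Int × List String) :
    Int × Int × List Int × List Int × Int :=
  let num := st.2.2.2.2 + 1
  if (!has_headers) || decide (0 < p.1) then
    let sc := get_answer_score p.2
    (st.1 + sc.1, st.2.1 + sc.2, st.2.2.1 ++ [sc.1], st.2.2.2.1 ++ [sc.2], num)
  else (st.1, st.2.1, st.2.2.1, st.2.2.2.1, num)

def get_company_scores (iterable : List (List String)) (has_headers : Bool) : Int × Int × List Int × List Int :=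
  let r := (PySem.List.enumerate iterable 0).foldl (outerStep has_headers) (0, 0, [], [], 0)
  (r.2.1, r.1, r.2.2.2.1, r.2.2.1)

-- ===== PORT B =====
-- dict .get with default 0 in B: total where A's lookup raises
def likert_alt (val : String) : Int :=
  if val ≠ "" then conversion_dict.getD (PySem.Str.lower val) 0 else 0

def get_answer_score_alt (row : List String) : Int × Int :=
  let n : Int := row.length
  let doing := doing_question_indexes.foldl (fun acc idx =>
      if idx < n then
        let a := PySem.Str.lower (PySem.List.pyGetD row idx "")
        acc + (if PySem.Str.isIn "yes" a then 1 else 0) + (if PySem.Str.isIn "every" a then 1 else 0)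
      else acc) 0
  let being := being_question_indexes.foldl (fun acc idx =>
      if idx < n then
        acc + (if idx ∈ inverted_question_indexes then -(likert_alt (PySem.List.pyGetD row idx ""))
               else likert_alt (PySem.List.pyGetD row idx ""))
      else acc) 0
  (doing, being)

def get_company_scores_alt (iterable : List (List String)) (has_headers : Bool) : Int × Int × List Int × List Int :=
  let rows := if has_headers then iterable.drop 1 else iterable
  let scores := rows.map get_answer_score_alt
  let doing_answers := scores.map (·.1)
  let being_answers := scores.map (·.2)
  (being_answers.sum, doing_answers.sum, being_answers, doing_answers)

-- ===== PRECONDITION & SPEC =====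
-- Pre_ excludes exactly the inputs where A raises KeyError: a scored row holding, at a
-- being-question index, a nonempty answer that is not one of the five likert phrases.
def Pre_get_company_scores (iterable : List (List String)) (has_headers : Bool) : Prop :=
  ∀ row ∈ (if has_headers then iterable.drop 1 else iterable),
    ∀ i ∈ being_question_indexes, i < (row.length : Int) →
      (PySem.List.pyGetD row i "" = "" ∨
       PySem.Str.lower (PySem.List.pyGetD row i "") ∈
         (["strongly agree", "agree", "neutral", "disagree", "strongly disagree"] : List String))
instance (iterable : List (List String)) (has_headers : Bool) : Decidable (Pre_get_company_scores iterable has_headers) := by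
  unfold Pre_get_company_scores; infer_instance

def pvWitness_get_company_scores : List (List String) × Bool :=
  ([["Company"], ["", "", "", "", "", "", "", "", "", "agree", "disagree", "yes, every day", "Strongly Agree"]], true)

def Spec_get_company_scores (iterable : List (List String)) (has_headers : Bool) (out : Int × Int × List Int × List Int) : Prop := out = get_company_scores_alt iterable has_headers
instance (iterable : List (List String)) (has_headers : Bool) (out : Int × Int × List Int × List Int) : Decidable (Spec_get_company_scores iterable has_headers out) := by unfold Spec_get_company_scores; infer_instance

-- ===== CLAIM (what is proved, stated in full; the proofs are below) =====
def Claim_equal_get_company_scores : Prop := ∀ (iterable : List (List String)) (has_headers : Bool), Dom_get_company_scores iterable has_headers → Pre_get_company_scores iterable has_headers → Spec_get_company_scores iterable has_headers (get_company_scores iterable has_headers)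

-- ===== LEMMAS AND PROOFS =====

-- per-index contributions of A's answer-scan
def fdP (p : Int × String) : Int :=
  if p.1 ∈ doing_question_indexes then
    (if PySem.Str.isIn "yes" (PySem.Str.lower p.2) then 1 else 0)
    + (if PySem.Str.isIn "every" (PySem.Str.lower p.2) then 1 else 0)
  else 0

def fbP (p : Int × String) : Int :=
  if p.1 ∈ being_question_indexes then
    (if p.1 ∈ inverted_question_indexes then (-1) * likert_to_int p.2 else likert_to_int p.2)
  else 0

theorem disjDB (j : Int) (h : j ∈ doing_question_indexes) : j ∉ being_question_indexes := by
  intro h2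
  simp only [doing_question_indexes, being_question_indexes, List.mem_cons, List.not_mem_nil, or_false] at h h2
  omega

theorem ansFold (l : List (Int × String)) (d b : Int) :
    l.foldl ansStep (d, b) = (d + (l.map fdP).sum, b + (l.map fbP).sum) := by
  induction l generalizing d b with
  | nil => simp
  | cons p l ih =>
    simp only [List.foldl_cons, List.map_cons, List.sum_cons]
    by_cases h1 : p.1 ∈ doing_question_indexes
    · have h2 : p.1 ∉ being_question_indexes := disjDB _ h1
      simp only [ansStep, fdP, fbP, if_pos h1, if_neg h2]
      rw [ih]; exact Prod.ext (by ring) (by ring)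
    · by_cases h3 : p.1 ∈ being_question_indexes
      · simp only [ansStep, fdP, fbP, if_neg h1, if_pos h3]
        rw [ih]; exact Prod.ext (by ring) (by ring)
      · simp only [ansStep, fdP, fbP, if_neg h1, if_neg h3]
        rw [ih]; exact Prod.ext (by ring) (by ring)

theorem singleIdxSum (xs : List String) (s j : Int) (f : Int × String → Int) :
    ((PySem.List.enumerate xs s).map (fun p => if p.1 = j then f p else 0)).sum
    = if s ≤ j ∧ j < s + xs.length then f (j, PySem.List.pyGetD xs (j - s) "") else 0 := by
  induction xs generalizing s with
  | nil =>
    rw [PySem.List.enumerate_nil, List.map_nil, List.sum_nil, if_neg]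
    simp only [List.length_nil]
    omega
  | cons x xs ih =>
    rw [PySem.List.enumerate_cons, List.map_cons, List.sum_cons, ih (s + 1)]
    by_cases hje : s = j
    · subst hje
      rw [if_pos rfl, if_neg (by omega), if_pos (by simp only [List.length_cons]; omega)]
      have h0 : s - s = (0 : Int) := by omega
      rw [h0, PySem.List.pyGetD_zero_cons, add_zero]
    · rw [if_neg hje]
      by_cases hc : s + 1 ≤ j ∧ j < s + 1 + xs.length
      · rw [if_pos hc, if_pos (by simp only [List.length_cons]; omega), zero_add]
        have hget : PySem.List.pyGetD (x :: xs) (j - s) "" = PySem.List.pyGetD xs (j - (s + 1)) "" := by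
          rw [PySem.List.pyGetD_of_nonneg _ _ (by omega), PySem.List.pyGetD_of_nonneg _ _ (by omega)]
          have hτ : (j - s).toNat = (j - (s + 1)).toNat + 1 := by omega
          rw [hτ, List.getD_cons_succ]
        rw [hget]
      · rw [if_neg hc, if_neg (by simp only [List.length_cons]; omega), zero_add]

theorem listIdxSum (L : List Int) (hnd : L.Nodup) (hpos : ∀ j ∈ L, 0 ≤ j)
    (xs : List String) (f : Int × String → Int) :
    ((PySem.List.enumerate xs 0).map (fun p => if p.1 ∈ L then f p else 0)).sum
    = (L.map (fun j => if j < (xs.length : Int) then f (j, PySem.List.pyGetD xs j "") else 0)).sum := by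
  induction L with
  | nil => simp
  | cons a L ih =>
    have ha : a ∉ L := (List.nodup_cons.mp hnd).1
    have hpt : ∀ p : Int × String,
        (if p.1 ∈ a :: L then f p else 0) = (if p.1 = a then f p else 0) + (if p.1 ∈ L then f p else 0) := by
      intro p
      by_cases h1 : p.1 = a
      · rw [if_pos h1, if_pos (by rw [h1]; exact List.mem_cons_self), if_neg (by rw [h1]; exact ha), add_zero]
      · rw [if_neg h1]
        by_cases h2 : p.1 ∈ L
        · rw [if_pos (List.mem_cons_of_mem _ h2), if_pos h2, zero_add]
        · rw [if_neg h2, if_neg (by simp [List.mem_cons, h1, h2]), add_zero]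
    calc ((PySem.List.enumerate xs 0).map (fun p => if p.1 ∈ a :: L then f p else 0)).sum
        = ((PySem.List.enumerate xs 0).map
            (fun p => (if p.1 = a then f p else 0) + (if p.1 ∈ L then f p else 0))).sum := by
          simp only [hpt]
      _ = ((PySem.List.enumerate xs 0).map (fun p => if p.1 = a then f p else 0)).sum
          + ((PySem.List.enumerate xs 0).map (fun p => if p.1 ∈ L then f p else 0)).sum := by
          rw [PySem.List.sum_map_add_int]
      _ = _ := by
          rw [singleIdxSum, ih (List.nodup_cons.mp hnd).2 (fun j hj => hpos j (List.mem_cons_of_mem _ hj))]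
          rw [List.map_cons, List.sum_cons]
          congr 1
          have h0 : 0 ≤ a := hpos a List.mem_cons_self
          have hsub : a - 0 = a := by omega
          by_cases hl : a < (xs.length : Int)
          · rw [if_pos (by omega), if_pos hl, hsub]
          · rw [if_neg (by omega), if_neg hl]

theorem foldIfAdd {α : Type} (L : List α) (c : α → Prop) [DecidablePred c] (h : α → Int) (acc : Int) :
    L.foldl (fun a x => if c x then a + h x else a) acc
    = acc + (L.map (fun x => if c x then h x else 0)).sum := by
  induction L generalizing acc with
  | nil => simp
  | cons x L ih => simp only [List.foldl_cons, List.map_cons, List.sum_cons]; split_ifs <;> rw [ih] <;> ring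

theorem likert_alt_eq : likert_alt = likert_to_int := rfl

theorem doingEq (row : List String) :
    ((PySem.List.enumerate row 0).map fdP).sum
    = doing_question_indexes.foldl (fun acc idx =>
        if idx < ((row.length : Int)) then
          let a := PySem.Str.lower (PySem.List.pyGetD row idx "")
          acc + (if PySem.Str.isIn "yes" a then 1 else 0) + (if PySem.Str.isIn "every" a then 1 else 0)
        else acc) 0 := by
  have hb : (fun (acc : Int) (idx : Int) =>
        if idx < ((row.length : Int)) then
          let a := PySem.Str.lower (PySem.List.pyGetD row idx "")
          acc + (if PySem.Str.isIn "yes" a then 1 else 0) + (if PySem.Str.isIn "every" a then 1 else 0)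
        else acc)
      = (fun (acc : Int) (idx : Int) =>
          if idx < ((row.length : Int)) then
            acc + ((if PySem.Str.isIn "yes" (PySem.Str.lower (PySem.List.pyGetD row idx "")) then 1 else 0)
                 + (if PySem.Str.isIn "every" (PySem.Str.lower (PySem.List.pyGetD row idx "")) then 1 else 0))
          else acc) := by
    funext acc idx
    by_cases h : idx < ((row.length : Int))
    · rw [if_pos h, if_pos h]
      show acc + _ + _ = acc + (_ + _)
      ring
    · rw [if_neg h, if_neg h]
  rw [hb, foldIfAdd _ (fun idx => idx < ((row.length : Int))) _ 0, zero_add]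
  exact listIdxSum doing_question_indexes (by decide) (by decide) row
    (fun p => (if PySem.Str.isIn "yes" (PySem.Str.lower p.2) then 1 else 0)
            + (if PySem.Str.isIn "every" (PySem.Str.lower p.2) then 1 else 0))

theorem beingEq (row : List String) :
    ((PySem.List.enumerate row 0).map fbP).sum
    = being_question_indexes.foldl (fun acc idx =>
        if idx < ((row.length : Int)) then
          acc + (if idx ∈ inverted_question_indexes then -(likert_alt (PySem.List.pyGetD row idx ""))
                 else likert_alt (PySem.List.pyGetD row idx ""))
        else acc) 0 := by
  rw [foldIfAdd _ (fun idx => idx < ((row.length : Int))) _ 0, zero_add]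
  calc ((PySem.List.enumerate row 0).map fbP).sum
      = ((PySem.List.enumerate row 0).map (fun p =>
          if p.1 ∈ being_question_indexes then
            (if p.1 ∈ inverted_question_indexes then (-1) * likert_to_int p.2 else likert_to_int p.2)
          else 0)).sum := rfl
    _ = (being_question_indexes.map (fun j => if j < ((row.length : Int)) then
          (if j ∈ inverted_question_indexes then (-1) * likert_to_int (PySem.List.pyGetD row j "")
           else likert_to_int (PySem.List.pyGetD row j "")) else 0)).sum :=
        listIdxSum being_question_indexes (by decide) (by decide) row
          (fun p => if p.1 ∈ inverted_question_indexes then (-1) * likert_to_int p.2 else likert_to_int p.2)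
    _ = _ := by
        apply congrArg List.sum
        apply List.map_congr_left
        intro j hj
        rw [likert_alt_eq]
        by_cases h1 : j < ((row.length : Int))
        · rw [if_pos h1, if_pos h1]
          by_cases h2 : j ∈ inverted_question_indexes
          · rw [if_pos h2, if_pos h2, neg_one_mul]
          · rw [if_neg h2, if_neg h2]
        · rw [if_neg h1, if_neg h1]

theorem rowEq (row : List String) : get_answer_score row = get_answer_score_alt row := by
  have halt : get_answer_score_alt row
      = (doing_question_indexes.foldl (fun acc idx =>
            if idx < ((row.length : Int)) then
              let a := PySem.Str.lower (PySem.List.pyGetD row idx "")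
              acc + (if PySem.Str.isIn "yes" a then 1 else 0) + (if PySem.Str.isIn "every" a then 1 else 0)
            else acc) 0,
         being_question_indexes.foldl (fun acc idx =>
            if idx < ((row.length : Int)) then
              acc + (if idx ∈ inverted_question_indexes then -(likert_alt (PySem.List.pyGetD row idx ""))
                     else likert_alt (PySem.List.pyGetD row idx ""))
            else acc) 0) := rfl
  show (PySem.List.enumerate row 0).foldl ansStep (0, 0) = _
  rw [ansFold, halt, ← doingEq, ← beingEq]
  exact Prod.ext (by simp) (by simp)

theorem outerFold (has_headers : Bool) (l : List (List String)) (s : Int)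
    (hs : has_headers = false ∨ 1 ≤ s) (cd cb : Int) (da ba : List Int) (num : Int) :
    (PySem.List.enumerate l s).foldl (outerStep has_headers) (cd, cb, da, ba, num)
    = (cd + (l.map (fun r => (get_answer_score r).1)).sum,
       cb + (l.map (fun r => (get_answer_score r).2)).sum,
       da ++ l.map (fun r => (get_answer_score r).1),
       ba ++ l.map (fun r => (get_answer_score r).2),
       num + l.length) := by
  induction l generalizing s cd cb da ba num with
  | nil => simp
  | cons r l ih =>
    rw [PySem.List.enumerate_cons, List.foldl_cons]
    have hc : ((!has_headers) || decide (0 < s)) = true := by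
      rcases hs with h | h
      · simp [h]
      · simp; omega
    simp only [outerStep, hc, if_true]
    rw [ih (s + 1) (by rcases hs with h | h; exacts [Or.inl h, Or.inr (by omega)])]
    simp only [List.map_cons, List.sum_cons, List.length_cons]
    refine Prod.ext (by ring) (Prod.ext (by ring) (Prod.ext (by simp) (Prod.ext (by simp) (by push_cast; ring))))

-- ===== VERDICT (by name: the statement is the Claim_ definition above) =====
theorem get_company_scores_spec : Claim_equal_get_company_scores := by
  intro iterable hh _ _
  unfold Spec_get_company_scores get_company_scores get_company_scores_alt
  cases hh with
  | false =>
    rw [outerFold false iterable 0 (Or.inl rfl) 0 0 [] [] 0]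
    simp [rowEq, List.map_map, Function.comp_def]
  | true =>
    cases iterable with
    | nil => rfl
    | cons r rest =>
      rw [PySem.List.enumerate_cons, List.foldl_cons]
      have hstep : outerStep true (0, 0, [], [], 0) ((0 : Int), r) = (0, 0, [], [], 1) := rfl
      rw [hstep]
      have h01 : (0 : Int) + 1 = 1 := rfl
      rw [h01, outerFold true rest 1 (Or.inr le_rfl) 0 0 [] [] 1]
      simp [rowEq, List.map_map, Function.comp_def]
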